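-- pv_equiv track=rewrite | github.com/Xilinx/finn | src/finn/transformation/fpgadataflow/transpose_decomposition.py | is_valid_hardware_permutation
-- ===== SOURCE A (Python) =====
-- from typing import List, Optional, Tuple
--
-- def is_valid_hardware_permutation(perm_array: List[int]) -> bool:
--     """
--     Check if a permutation array represents a valid hardware operation.
--     Valid operations are:
--     - inner_shuffle: swap last two elements
--     - outer_shuffle: any permutation that doesn't move the last element
--     """
--     n = len(perm_array)
--     if n < 2:
--         return True
--
--     identity = list(range(n))
--     if perm_array == identity:
--         return True  # Identity is always valid
--
--     expected_inner_shuffle = identity[:]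
--     expected_inner_shuffle[-2], expected_inner_shuffle[-1] = (
--         expected_inner_shuffle[-1],
--         expected_inner_shuffle[-2],
--     )
--     if perm_array == expected_inner_shuffle:
--         return True
--
--     diff_count = sum(1 for i in range(n) if perm_array[i] != identity[i])
--     if diff_count == 2:  # Simple two-element swap (one type of outer_shuffle)
--         diff_positions = [i for i in range(n) if perm_array[i] != identity[i]]
--         if len(diff_positions) == 2:
--             pos1, pos2 = diff_positions
--             if pos1 != n - 1 and pos2 != n - 1:
--                 if perm_array[pos1] == pos2 and perm_array[pos2] == pos1:
--                     return True
--
--     return False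
-- ===== SOURCE B (Python) =====
-- def is_valid_hardware_permutation(perm_array):
--     n = len(perm_array)
--     if n < 2:
--         return True
--     first = None   # (position, value) of the first mismatch seen
--     second = None  # position of the second mismatch, verified mutual with the first
--     for i, v in enumerate(perm_array):
--         if v == i:
--             continue
--         if first is None:
--             first = (i, v)
--         elif second is None:
--             p, q = first
--             if v != p or q != i:
--                 return False   # second mismatch is not the mutual partner
--             second = i
--         else:
--             return False       # a third mismatch can never be valid
--     if first is None:
--         return True            # identity
--     if second is None:
--         return False           # a single mismatch is impossible to validate
--     return second != n - 1 or first[0] == n - 2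
-- ===== Notes on version B (the rewrite author's own statement) =====
-- stated objective: alternative
-- what changed: B replaces A's staged whole-list comparisons (identity list, inner-shuffle list, a counting pass and a filtering pass) by a single left-to-right pass with a small state machine (no mismatch / one mismatch recorded / mutual pair confirmed) that rejects early on the second non-mutual or the third mismatch.
import Mathlib
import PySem

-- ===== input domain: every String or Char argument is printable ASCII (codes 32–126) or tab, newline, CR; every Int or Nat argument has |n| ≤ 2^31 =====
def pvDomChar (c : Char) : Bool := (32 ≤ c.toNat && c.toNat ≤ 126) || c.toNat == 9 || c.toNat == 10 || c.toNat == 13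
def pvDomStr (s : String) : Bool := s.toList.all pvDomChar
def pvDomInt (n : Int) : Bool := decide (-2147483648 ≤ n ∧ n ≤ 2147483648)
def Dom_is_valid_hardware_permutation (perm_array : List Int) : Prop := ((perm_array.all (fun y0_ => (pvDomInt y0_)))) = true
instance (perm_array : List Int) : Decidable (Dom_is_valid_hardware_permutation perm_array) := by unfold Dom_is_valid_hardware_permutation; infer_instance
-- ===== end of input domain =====

-- B replaces A's staged list comparisons and counting/filtering passes by a single pass
-- with a three-state accumulator (objective: alternative, same asymptotic cost).

-- ===== PORT A =====
def is_valid_hardware_permutation (perm_array : List Int) : Bool :=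
  let n : Int := PySem.List.len perm_array
  if n < 2 then true
  else
    let identity := PySem.List.pyRange 0 n 1
    if perm_array = identity then true
    else
      -- expected_inner_shuffle = identity[:]; swap of expected[-2], expected[-1]
      let expected_inner_shuffle := identity
      let expected_inner_shuffle :=
        PySem.List.pySetD
          (PySem.List.pySetD expected_inner_shuffle (-2)
            (PySem.List.pyGetD expected_inner_shuffle (-1) 0))
          (-1) (PySem.List.pyGetD expected_inner_shuffle (-2) 0)
      if perm_array = expected_inner_shuffle then true
      else
        let diff_count : Int :=
          (PySem.List.pyRange 0 n 1).foldl
            (fun acc i =>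
              if PySem.List.pyGetD perm_array i 0 ≠ PySem.List.pyGetD identity i 0 then acc + 1
              else acc) 0
        if diff_count = 2 then
          let diff_positions :=
            (PySem.List.pyRange 0 n 1).filter
              (fun i => PySem.List.pyGetD perm_array i 0 ≠ PySem.List.pyGetD identity i 0)
          if diff_positions.length = 2 then
            match diff_positions with
            | [pos1, pos2] =>
              if pos1 ≠ n - 1 ∧ pos2 ≠ n - 1 then
                if PySem.List.pyGetD perm_array pos1 0 = pos2 ∧
                   PySem.List.pyGetD perm_array pos2 0 = pos1 then true
                else false
              else false
            | _ => false
          else false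
        else false

-- ===== PORT B =====
-- B's loop over enumerate(perm_array) with state (first, second); the Python early
-- returns become the Bool results of this structural recursion.
def pvLoopB (n : Int) : List (Int × Int) → Option (Int × Int) → Option Int → Bool
  | [], first, second =>
    match first with
    | none => true
    | some (p, _) =>
      match second with
      | none => false
      | some s => decide (s ≠ n - 1) || decide (p = n - 2)
  | (i, v) :: rest, first, second =>
    if v = i then pvLoopB n rest first second
    else
      match first with
      | none => pvLoopB n rest (some (i, v)) second
      | some (p, q) =>
        match second with
        | none => if v ≠ p ∨ q ≠ i then false else pvLoopB n rest (some (p, q)) (some i)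
        | some _ => false

def is_valid_hardware_permutation_alt (perm_array : List Int) : Bool :=
  let n : Int := PySem.List.len perm_array
  if n < 2 then true
  else pvLoopB n (PySem.List.enumerate perm_array 0) none none

-- ===== PRECONDITION & SPEC =====
def Spec_is_valid_hardware_permutation (perm_array : List Int) (out : Bool) : Prop := out = is_valid_hardware_permutation_alt perm_array
instance (perm_array : List Int) (out : Bool) : Decidable (Spec_is_valid_hardware_permutation perm_array out) := by unfold Spec_is_valid_hardware_permutation; infer_instance

-- ===== CLAIM (what is proved, stated in full; the proofs are below) =====
def Claim_equal_is_valid_hardware_permutation : Prop := ∀ (perm_array : List Int), Dom_is_valid_hardware_permutation perm_array → Spec_is_valid_hardware_permutation perm_array (is_valid_hardware_permutation perm_array)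

-- ===== LEMMAS AND PROOFS =====

theorem pvIdentity_get (n : Int) (i : Int) (h0 : 0 ≤ i) (h1 : i < n) (d : Int) :
    PySem.List.pyGetD (PySem.List.pyRange 0 n 1) i d = i := by
  rw [PySem.List.pyGetD_eq_getElem _ d h0
    (by rw [PySem.List.length_pyRange_one]; omega)]
  rw [PySem.List.getElem_pyRange_one]
  omega

theorem pvDiff_eq_A_filter (perm : List Int) :
    (PySem.List.pyRange 0 (PySem.List.len perm) 1).filter
      (fun i => PySem.List.pyGetD perm i 0 ≠
        PySem.List.pyGetD (PySem.List.pyRange 0 (PySem.List.len perm) 1) i 0)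
      = (PySem.List.pyRange 0 (PySem.List.len perm) 1).filter
        (fun i => PySem.List.pyGetD perm i 0 ≠ i) := by
  apply List.filter_congr
  intro i hi
  rw [PySem.List.mem_pyRange_one] at hi
  rw [pvIdentity_get _ _ hi.1 hi.2]

theorem pvCount_eq (perm : List Int) :
    (PySem.List.pyRange 0 (PySem.List.len perm) 1).foldl
      (fun acc i =>
        if PySem.List.pyGetD perm i 0 ≠
           PySem.List.pyGetD (PySem.List.pyRange 0 (PySem.List.len perm) 1) i 0 then acc + 1
        else acc) 0 =
      (((PySem.List.pyRange 0 (PySem.List.len perm) 1).filter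
        (fun i => PySem.List.pyGetD perm i 0 ≠ i)).length : Int) := by
  rw [show (fun (acc : Int) i =>
        if PySem.List.pyGetD perm i 0 ≠
           PySem.List.pyGetD (PySem.List.pyRange 0 (PySem.List.len perm) 1) i 0 then acc + 1
        else acc)
      = (fun acc i => if (decide (PySem.List.pyGetD perm i 0 ≠
           PySem.List.pyGetD (PySem.List.pyRange 0 (PySem.List.len perm) 1) i 0) : Bool) then acc + 1 else acc) from by
      funext acc i; simp]
  rw [PySem.List.foldl_count_if]
  rw [← pvDiff_eq_A_filter]
  simp [List.countP_eq_length_filter]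

theorem pvIdentity_iff (perm : List Int) :
    perm = PySem.List.pyRange 0 (PySem.List.len perm) 1 ↔
    (PySem.List.pyRange 0 (PySem.List.len perm) 1).filter
      (fun i => PySem.List.pyGetD perm i 0 ≠ i) = [] := by
  constructor
  · intro h
    rw [List.filter_eq_nil_iff]
    intro i hi
    rw [PySem.List.mem_pyRange_one] at hi
    simp only [decide_eq_true_eq, not_not, ne_eq]
    conv_lhs => rw [h]
    exact pvIdentity_get _ _ hi.1 hi.2 0
  · intro h
    rw [List.filter_eq_nil_iff] at h
    apply List.ext_getElem
    · rw [PySem.List.length_pyRange_one]; simp [PySem.List.len]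
    · intro k h1 h2
      have hk : (k : Int) ∈ PySem.List.pyRange 0 (PySem.List.len perm) 1 := by
        rw [PySem.List.mem_pyRange_one]
        constructor
        · omega
        · simp [PySem.List.len] at h1 ⊢; omega
      have := h _ hk
      simp only [decide_eq_true_eq, not_not, ne_eq] at this
      rw [PySem.List.pyGetD_eq_getElem perm 0 (by omega) (by exact_mod_cast h1)] at this
      rw [PySem.List.getElem_pyRange_one]
      simpa using this

theorem pvDiff_pairwise (perm : List Int) :
    ((PySem.List.pyRange 0 (PySem.List.len perm) 1).filter
      (fun i => PySem.List.pyGetD perm i 0 ≠ i)).Pairwise (· < ·) := by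
  exact (PySem.List.pairwise_lt_pyRange_one _ _).filter _

theorem pvMem_diff (perm : List Int) (i : Int) :
    i ∈ (PySem.List.pyRange 0 (PySem.List.len perm) 1).filter
      (fun i => PySem.List.pyGetD perm i 0 ≠ i) ↔
    0 ≤ i ∧ i < PySem.List.len perm ∧ PySem.List.pyGetD perm i 0 ≠ i := by
  simp [List.mem_filter, PySem.List.mem_pyRange_one, and_assoc]

def pvDiff (perm : List Int) : List Int :=
  (PySem.List.pyRange 0 (PySem.List.len perm) 1).filter
    (fun i => PySem.List.pyGetD perm i 0 ≠ i)

theorem pvLen_id (perm : List Int) :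
    (PySem.List.pyRange 0 (PySem.List.len perm) 1).length = perm.length := by
  rw [PySem.List.length_pyRange_one]; simp [PySem.List.len]

theorem pvFilter_pair (N : Int) (hN : 2 ≤ N) (p : Int → Bool)
    (h : ∀ i, 0 ≤ i → i < N → (p i = true ↔ (i = N - 2 ∨ i = N - 1))) :
    (PySem.List.pyRange 0 N 1).filter p = [N - 2, N - 1] := by
  rw [PySem.List.pyRange_one_append 0 (N - 2) N (by omega) (by omega), List.filter_append]
  rw [PySem.List.pyRange_one_cons (show N - 2 < N by omega),
      PySem.List.pyRange_one_cons (show N - 2 + 1 < N by omega),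
      PySem.List.pyRange_one_eq_nil (show N ≤ N - 2 + 1 + 1 by omega)]
  have h1 : (PySem.List.pyRange 0 (N - 2) 1).filter p = [] := by
    rw [List.filter_eq_nil_iff]
    intro i hi
    rw [PySem.List.mem_pyRange_one] at hi
    have := h i hi.1 (by omega)
    simp only [Bool.not_eq_true]
    rcases hp : p i with _ | _
    · rfl
    · exact absurd (this.mp hp) (by omega)
  rw [h1]
  have h2 : p (N - 2) = true := (h (N - 2) (by omega) (by omega)).mpr (Or.inl rfl)
  have h3 : p (N - 2 + 1) = true := (h (N - 2 + 1) (by omega) (by omega)).mpr (Or.inr (by omega))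
  simp [h2, h3]
  omega

def pvExpected (perm : List Int) : List Int :=
  let n : Int := PySem.List.len perm
  let identity := PySem.List.pyRange 0 n 1
  PySem.List.pySetD
    (PySem.List.pySetD identity (-2) (PySem.List.pyGetD identity (-1) 0))
    (-1) (PySem.List.pyGetD identity (-2) 0)

theorem pySetD_neg (xs : List Int) (k : Nat) (v : Int) (hk : 0 < k) (hk2 : k ≤ xs.length) :
    PySem.List.pySetD xs (-(k : Int)) v = xs.set (xs.length - k) v := by
  simp only [PySem.List.pySetD, PySem.List.pySet?, PySem.List.pyIdx?]
  rw [if_neg (by omega), if_pos (by omega)]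
  simp

theorem pvExpected_eval (perm : List Int) (h2 : 2 ≤ perm.length) :
    pvExpected perm =
      ((PySem.List.pyRange 0 (PySem.List.len perm) 1).set (perm.length - 2)
        ((perm.length : Int) - 1)).set (perm.length - 1) ((perm.length : Int) - 2) := by
  unfold pvExpected
  have hl := pvLen_id perm
  have hg1 : PySem.List.pyGetD (PySem.List.pyRange 0 (PySem.List.len perm) 1) (-1) 0
      = (perm.length : Int) - 1 := by
    rw [PySem.List.pyGetD_neg_ofNat _ 1 0 (by omega) (by omega)]
    rw [PySem.List.getElem_pyRange_one]
    rw [hl]; omega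
  have hg2 : PySem.List.pyGetD (PySem.List.pyRange 0 (PySem.List.len perm) 1) (-2) 0
      = (perm.length : Int) - 2 := by
    rw [PySem.List.pyGetD_neg_ofNat _ 2 0 (by omega) (by omega)]
    rw [PySem.List.getElem_pyRange_one]
    rw [hl]; omega
  simp only [hg1, hg2]
  rw [show ((-2:Int)) = -((2:Nat):Int) from by norm_num,
      pySetD_neg _ 2 _ (by omega) (by omega), hl]
  rw [show ((-1:Int)) = -((1:Nat):Int) from by norm_num,
      pySetD_neg _ 1 _ (by omega) (by simp; omega)]
  simp

theorem pvExpected_length (perm : List Int) (h2 : 2 ≤ perm.length) :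
    (pvExpected perm).length = perm.length := by
  rw [pvExpected_eval perm h2]
  simp

theorem pvE_get (perm : List Int) (h2 : 2 ≤ perm.length) (k : Nat) (hk : k < perm.length) :
    (pvExpected perm)[k]'(by rw [pvExpected_length perm h2]; exact hk) =
      if k = perm.length - 2 then ((perm.length : Int) - 1)
      else if k = perm.length - 1 then ((perm.length : Int) - 2)
      else (k : Int) := by
  have hl := pvLen_id perm
  simp only [pvExpected_eval perm h2]
  rw [List.getElem_set, List.getElem_set]
  by_cases hA : k = perm.length - 1
  · rw [if_pos (by omega), if_pos hA, if_neg (by omega)]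
  · rw [if_neg (by omega), if_neg hA]
    by_cases hB : k = perm.length - 2
    · rw [if_pos (by omega), if_pos hB]
    · rw [if_neg (by omega), if_neg hB, PySem.List.getElem_pyRange_one]
      omega

theorem pvExpected_iff (perm : List Int) (h2 : 2 ≤ perm.length) :
    perm = pvExpected perm ↔
      (pvDiff perm = [(perm.length : Int) - 2, (perm.length : Int) - 1] ∧
       PySem.List.pyGetD perm ((perm.length : Int) - 2) 0 = (perm.length : Int) - 1 ∧
       PySem.List.pyGetD perm ((perm.length : Int) - 1) 0 = (perm.length : Int) - 2) := by
  have hget : ∀ (i : Int) (h0 : 0 ≤ i) (h1 : i < (perm.length : Int)),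
      PySem.List.pyGetD perm i 0 = perm[i.toNat]'(by omega) := by
    intro i h0 h1
    exact PySem.List.pyGetD_eq_getElem perm 0 h0 (by omega)
  have hN : PySem.List.len perm = (perm.length : Int) := by simp [PySem.List.len]
  constructor
  · intro h
    have hval : ∀ k : Nat, (hk : k < perm.length) → perm[k] =
        (if k = perm.length - 2 then ((perm.length : Int) - 1)
         else if k = perm.length - 1 then ((perm.length : Int) - 2)
         else (k : Int)) := by
      intro k hk
      rw [List.getElem_of_eq h hk]
      exact pvE_get perm h2 k hk
    refine ⟨?_, ?_, ?_⟩
    · unfold pvDiff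
      rw [hN]
      apply pvFilter_pair _ (by omega)
      intro i h0 h1
      rw [hget i h0 h1]
      have hkn : i.toNat < perm.length := by omega
      rw [hval i.toNat hkn]
      constructor
      · intro hp
        simp only [decide_eq_true_eq, ne_eq] at hp
        by_cases hA : i.toNat = perm.length - 2
        · left; omega
        · by_cases hB : i.toNat = perm.length - 1
          · right; omega
          · exfalso; rw [if_neg hA, if_neg hB] at hp; omega
      · intro hor
        simp only [decide_eq_true_eq, ne_eq]
        rcases hor with hA | hB
        · rw [if_pos (by omega)]; omega
        · rw [if_neg (by omega), if_pos (by omega)]; omega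
    · rw [hget _ (by omega) (by omega), hval _ (by omega), if_pos (by omega)]
    · rw [hget _ (by omega) (by omega), hval _ (by omega)]
      rw [if_neg (by omega), if_pos (by omega)]
  · rintro ⟨hD, hs1, hs2⟩
    apply List.ext_getElem
    · rw [pvExpected_length perm h2]
    · intro k h1 hE
      rw [pvE_get perm h2 k h1]
      by_cases hA : k = perm.length - 2
      · rw [if_pos hA]
        rw [hget _ (by omega) (by omega)] at hs1
        rw [← hs1]; congr 1; omega
      · by_cases hB : k = perm.length - 1
        · rw [if_neg hA, if_pos hB]
          rw [hget _ (by omega) (by omega)] at hs2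
          rw [← hs2]; congr 1; omega
        · rw [if_neg hA, if_neg hB]
          have hnotmem : (k : Int) ∉ pvDiff perm := by
            rw [hD]
            intro hmem
            rcases List.mem_pair.mp hmem with h' | h' <;> omega
          unfold pvDiff at hnotmem
          by_contra hne
          apply hnotmem
          rw [List.mem_filter]
          refine ⟨?_, ?_⟩
          · rw [hN, PySem.List.mem_pyRange_one]; constructor <;> omega
          · simp only [decide_eq_true_eq, ne_eq]
            rw [hget _ (by omega) (by omega)]
            simpa using hne

-- B's loop ignores matched pairs: it computes the same value on the mismatched pairs only.
theorem pvLoopB_filter (n : Int) (pairs : List (Int × Int))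
    (first : Option (Int × Int)) (second : Option Int) :
    pvLoopB n pairs first second
      = pvLoopB n (pairs.filter (fun p => decide (p.2 ≠ p.1))) first second := by
  induction pairs generalizing first second with
  | nil => rfl
  | cons hd tl ih =>
    obtain ⟨i, v⟩ := hd
    rw [List.filter_cons]
    by_cases hv : v = i
    · rw [if_neg (by simp [hv])]
      simp only [pvLoopB, if_pos hv]
      exact ih first second
    · rw [if_pos (by simp [hv])]
      rcases first with _ | ⟨p, q⟩
      · simp only [pvLoopB, if_neg hv]
        exact ih _ _
      · rcases second with _ | s
        · simp only [pvLoopB, if_neg hv]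
          by_cases hm : v ≠ p ∨ q ≠ i
          · rw [if_pos hm, if_pos hm]
          · rw [if_neg hm, if_neg hm]
            exact ih _ _
        · simp only [pvLoopB, if_neg hv]

-- ===== VERDICT (by name: the statement is the Claim_ definition above) =====
theorem is_valid_hardware_permutation_spec : Claim_equal_is_valid_hardware_permutation := by
  intro perm _
  unfold Spec_is_valid_hardware_permutation is_valid_hardware_permutation is_valid_hardware_permutation_alt
  have hN : PySem.List.len perm = (perm.length : Int) := by simp [PySem.List.len]
  simp only [hN]
  by_cases hlt : ((perm.length : Int)) < 2
  · rw [if_pos hlt, if_pos hlt]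
  · rw [if_neg hlt, if_neg hlt]
    have h2 : 2 ≤ perm.length := by omega
    -- hN-normalised instances of the library-style lemmas above
    have hfa := pvDiff_eq_A_filter perm
    rw [hN] at hfa
    have hct := pvCount_eq perm
    rw [hN] at hct
    have hpv : List.filter (fun i => decide (PySem.List.pyGetD perm i 0 ≠ i))
        (PySem.List.pyRange 0 (perm.length : Int) 1) = pvDiff perm := by
      unfold pvDiff; rw [hN]
    have hidiff := pvIdentity_iff perm
    rw [hN] at hidiff
    have hmem := pvMem_diff perm
    simp only [hN] at hmem
    have hpw := pvDiff_pairwise perm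
    rw [hN] at hpw
    have hE : PySem.List.pySetD
        (PySem.List.pySetD (PySem.List.pyRange 0 (perm.length : Int) 1) (-2)
          (PySem.List.pyGetD (PySem.List.pyRange 0 (perm.length : Int) 1) (-1) 0))
        (-1) (PySem.List.pyGetD (PySem.List.pyRange 0 (perm.length : Int) 1) (-2) 0)
        = pvExpected perm := by
      simp only [pvExpected, hN]
    -- the B side: the loop over enumerate = the loop over the mismatch pairs only
    have hBloop : pvLoopB ((perm.length : Int)) (PySem.List.enumerate perm 0) none none
        = pvLoopB ((perm.length : Int))
            ((pvDiff perm).map (fun j => (j, PySem.List.pyGetD perm j 0))) none none := by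
      rw [pvLoopB_filter]
      congr 1
      rw [PySem.List.enumerate_eq_map_pyRange perm 0, hN, List.filter_map]
      unfold pvDiff
      rw [hN]
      simp [Function.comp_def]
    rw [hfa, hct, hE, hpv, hBloop]
    by_cases hid : perm = PySem.List.pyRange 0 (perm.length : Int) 1
    · have hDnil : pvDiff perm = [] := by
        rw [← hpv, hidiff.mp hid]
      rw [if_pos hid, hDnil]
      simp [pvLoopB]
    · rw [if_neg hid]
      have hDne : pvDiff perm ≠ [] := by
        intro h
        exact hid (hidiff.mpr (by rw [← hpv] at h; exact h))
      by_cases hexp : perm = pvExpected perm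
      · rw [if_pos hexp]
        obtain ⟨hDpair, hs1, hs2⟩ := (pvExpected_iff perm h2).mp hexp
        rw [hDpair]
        have hne1 : PySem.List.pyGetD perm ((perm.length : Int) - 2) 0 ≠ (perm.length : Int) - 2 := by
          rw [hs1]; omega
        have hne2 : PySem.List.pyGetD perm ((perm.length : Int) - 1) 0 ≠ (perm.length : Int) - 1 := by
          rw [hs2]; omega
        simp [pvLoopB, hs1, hs2]
      · rw [if_neg hexp]
        rcases hDs : pvDiff perm with _ | ⟨p1, _ | ⟨p2, _ | ⟨p3, rest⟩⟩⟩
        · exact absurd hDs hDne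
        · -- singleton diff: A's count is 1; B ends with first set, second unset
          have hm1 : 0 ≤ p1 ∧ p1 < (perm.length : Int) ∧ PySem.List.pyGetD perm p1 0 ≠ p1 := by
            have : p1 ∈ pvDiff perm := by rw [hDs]; exact List.mem_cons_self
            rw [← hpv] at this
            exact (hmem p1).mp this
          simp [pvLoopB, hm1.2.2]
        · -- the two-element case
          have hm1 : 0 ≤ p1 ∧ p1 < (perm.length : Int) ∧ PySem.List.pyGetD perm p1 0 ≠ p1 := by
            have : p1 ∈ pvDiff perm := by rw [hDs]; exact List.mem_cons_self
            rw [← hpv] at this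
            exact (hmem p1).mp this
          have hm2 : 0 ≤ p2 ∧ p2 < (perm.length : Int) ∧ PySem.List.pyGetD perm p2 0 ≠ p2 := by
            have : p2 ∈ pvDiff perm := by rw [hDs]; simp
            rw [← hpv] at this
            exact (hmem p2).mp this
          have hlt12 : p1 < p2 := by
            have := hpw
            rw [← hpv] at hDs
            rw [hDs] at this
            simp [List.pairwise_cons] at this
            exact this
          rw [if_pos (show (([p1, p2] : List Int).length : Int) = 2 by norm_num),
              if_pos (show ([p1, p2] : List Int).length = 2 from rfl)]
          simp only [List.map, pvLoopB, if_neg hm1.2.2, if_neg hm2.2.2]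
          by_cases hswap : PySem.List.pyGetD perm p1 0 = p2 ∧ PySem.List.pyGetD perm p2 0 = p1
          · rw [if_neg (show ¬(PySem.List.pyGetD perm p2 0 ≠ p1 ∨ PySem.List.pyGetD perm p1 0 ≠ p2) by
              push Not; exact ⟨hswap.2, hswap.1⟩)]
            by_cases hlast : p2 = (perm.length : Int) - 1
            · -- swap touching the last position: valid only as the inner shuffle,
              -- which the hexp case already excluded
              have hp1 : p1 ≠ (perm.length : Int) - 2 := by
                intro hp1
                apply hexp
                apply (pvExpected_iff perm h2).mpr
                refine ⟨by rw [hDs, hp1, hlast], ?_, ?_⟩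
                · rw [← hp1, hswap.1, hlast]
                · rw [← hlast, hswap.2, hp1]
              rw [if_neg (show ¬(p1 ≠ (perm.length : Int) - 1 ∧ p2 ≠ (perm.length : Int) - 1) by
                intro h; exact h.2 hlast)]
              simp [hlast, hp1]
            · -- swap away from the last position: valid for both
              rw [if_pos (show p1 ≠ (perm.length : Int) - 1 ∧ p2 ≠ (perm.length : Int) - 1 by
                constructor <;> omega)]
              rw [if_pos hswap]
              simp [hlast]
          · -- not a mutual swap: both sides reject
            rw [if_pos (show PySem.List.pyGetD perm p2 0 ≠ p1 ∨ PySem.List.pyGetD perm p1 0 ≠ p2 by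
              by_contra h
              rw [not_or, not_not, not_not] at h
              exact hswap ⟨h.2, h.1⟩)]
            by_cases hg : p1 ≠ (perm.length : Int) - 1 ∧ p2 ≠ (perm.length : Int) - 1
            · rw [if_pos hg, if_neg hswap]
            · rw [if_neg hg]
        · -- three or more moved positions: A's count is ≥ 3; B hits a third mismatch
          have hm1 : 0 ≤ p1 ∧ p1 < (perm.length : Int) ∧ PySem.List.pyGetD perm p1 0 ≠ p1 := by
            have : p1 ∈ pvDiff perm := by rw [hDs]; exact List.mem_cons_self
            rw [← hpv] at this
            exact (hmem p1).mp this
          have hm2 : 0 ≤ p2 ∧ p2 < (perm.length : Int) ∧ PySem.List.pyGetD perm p2 0 ≠ p2 := by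
            have : p2 ∈ pvDiff perm := by rw [hDs]; simp
            rw [← hpv] at this
            exact (hmem p2).mp this
          have hm3 : 0 ≤ p3 ∧ p3 < (perm.length : Int) ∧ PySem.List.pyGetD perm p3 0 ≠ p3 := by
            have : p3 ∈ pvDiff perm := by rw [hDs]; simp
            rw [← hpv] at this
            exact (hmem p3).mp this
          rw [if_neg (show ¬(((p1 :: p2 :: p3 :: rest : List Int).length : Int) = 2) by
            simp; omega)]
          simp only [List.map, pvLoopB, if_neg hm1.2.2, if_neg hm2.2.2]
          by_cases hsw : PySem.List.pyGetD perm p2 0 ≠ p1 ∨ PySem.List.pyGetD perm p1 0 ≠ p2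
          · rw [if_pos hsw]
          · rw [if_neg hsw]
            simp only [if_neg hm3.2.2]
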